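-- pv_equiv track=rewrite | github.com/ahmedelshafie55/automata_practical_exam_-4430- | Practical 1.py | dfa_divisible_by_3
-- ===== SOURCE A (Python) =====
-- def dfa_divisible_by_3(binary_string):
--     # الحالات: 0 (عدد 1's ≡ 0 mod 3), 1 (≡ 1 mod 3), 2 (≡ 2 mod 3)
--     state = 0
--     for char in binary_string:
--         if char == '1':
--             state = (state + 1) % 3
--         elif char != '0':
--             return False  # مدخل غير صحيح
--     return state == 0
-- ===== SOURCE B (Python) =====
-- def ones_mod3(s):
--     # divide and conquer: (count of '1's) mod 3, or None if a non-binary char occurs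
--     if len(s) == 0:
--         return 0
--     if len(s) == 1:
--         if s == '1':
--             return 1
--         if s == '0':
--             return 0
--         return None
--     mid = len(s) // 2
--     a = ones_mod3(s[:mid])
--     b = ones_mod3(s[mid:])
--     if a is None or b is None:
--         return None
--     return (a + b) % 3
--
-- def dfa_divisible_by_3(binary_string):
--     return ones_mod3(binary_string) == 0
-- ===== Notes on version B (the rewrite author's own statement) =====
-- stated objective: alternative
-- what changed: Replaces A's left-to-right DFA with a running state by a divide-and-conquer recursion that splits the string in halves, returns each half's count of '1's mod 3 (None on an invalid char), and combines them mod 3.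
import Mathlib
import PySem

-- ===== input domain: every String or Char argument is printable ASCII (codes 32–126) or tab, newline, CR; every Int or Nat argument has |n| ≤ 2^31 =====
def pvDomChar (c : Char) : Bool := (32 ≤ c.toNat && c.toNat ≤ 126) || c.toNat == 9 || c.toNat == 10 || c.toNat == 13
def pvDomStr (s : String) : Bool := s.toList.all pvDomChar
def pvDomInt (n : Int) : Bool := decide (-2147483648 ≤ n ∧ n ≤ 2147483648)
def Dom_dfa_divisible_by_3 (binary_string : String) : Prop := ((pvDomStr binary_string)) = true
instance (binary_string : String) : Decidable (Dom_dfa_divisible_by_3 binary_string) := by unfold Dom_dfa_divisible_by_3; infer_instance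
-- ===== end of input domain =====

-- B replaces A's linear DFA scan with a divide-and-conquer recursion on string halves
-- combining counts-of-1 mod 3 (objective: alternative; same O(n) cost).

-- ===== PORT A ===== (literal port: running DFA state, early False on invalid char)
def dfaAGo (state : Int) : List Char → Bool
  | [] => state == 0
  | c :: rest =>
      if c == '1' then dfaAGo (PySem.Int.mod (state + 1) 3) rest
      else if c != '0' then false
      else dfaAGo state rest

def dfa_divisible_by_3 (binary_string : String) : Bool :=
  dfaAGo 0 binary_string.toList

-- ===== PORT B ===== (divide and conquer on halves; s[:mid]/s[mid:] via PySem.List.slice, exact;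
-- len(s)//2 on a Nat length equals Nat division, exact)
def onesMod3 (l : List Char) : Option Int :=
  if l.length = 0 then some 0
  else if l.length = 1 then
    (if l = ['1'] then some 1 else if l = ['0'] then some 0 else none)
  else
    let mid := l.length / 2
    match onesMod3 (PySem.List.slice l none (some (mid : Int))),
          onesMod3 (PySem.List.slice l (some (mid : Int)) none) with
    | some a, some b => some (PySem.Int.mod (a + b) 3)
    | _, _ => none
termination_by l.length
decreasing_by
  · rw [PySem.List.slice_to_natCast]
    simp [List.length_take]; omega
  · rw [PySem.List.slice_from_natCast]
    simp [List.length_drop]; omega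

def dfa_divisible_by_3_alt (binary_string : String) : Bool :=
  onesMod3 binary_string.toList == some 0

-- ===== PRECONDITION & SPEC =====
def Spec_dfa_divisible_by_3 (binary_string : String) (out : Bool) : Prop := out = dfa_divisible_by_3_alt binary_string
instance (binary_string : String) (out : Bool) : Decidable (Spec_dfa_divisible_by_3 binary_string out) := by unfold Spec_dfa_divisible_by_3; infer_instance

-- ===== CLAIM =====
def Claim_equal_dfa_divisible_by_3 : Prop := ∀ (binary_string : String), Dom_dfa_divisible_by_3 binary_string → Spec_dfa_divisible_by_3 binary_string (dfa_divisible_by_3 binary_string)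

-- ===== LEMMAS AND PROOFS =====
-- A's loop computes: False on the first non-binary char, else (state + count '1') mod 3 == 0.
lemma dfaAGo_eq (l : List Char) : ∀ (state : Int), 0 ≤ state → state < 3 →
    dfaAGo state l =
      (if ! l.all (fun c => c == '0' || c == '1') then false
       else PySem.Int.mod (state + (l.count '1' : Int)) 3 == 0) := by
  induction l with
  | nil =>
    intro state h0 h3
    simp only [dfaAGo, List.all_nil, List.count_nil, Bool.not_true]
    simp [PySem.Int.mod, Int.fmod_eq_emod]
    omega
  | cons c rest ih =>
    intro state h0 h3
    by_cases h1 : c = '1'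
    · subst h1
      have hm0 : 0 ≤ PySem.Int.mod (state + 1) 3 := by
        simp [PySem.Int.mod, Int.fmod_eq_emod]; omega
      have hm3 : PySem.Int.mod (state + 1) 3 < 3 := by
        simp [PySem.Int.mod, Int.fmod_eq_emod]; omega
      simp only [dfaAGo, ih _ hm0 hm3, List.all_cons, List.count_cons]
      simp
      ring_nf
    · by_cases h0c : c = '0'
      · subst h0c
        simp [dfaAGo, ih _ h0 h3]
      · simp [dfaAGo, h0c, h1, List.all_cons]

-- B's recursion computes: none on any non-binary char, else count '1' mod 3.
lemma onesMod3_eq (l : List Char) :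
    onesMod3 l =
      (if l.all (fun c => c == '0' || c == '1') then some (PySem.Int.mod (l.count '1' : Int) 3) else none) := by
  induction hn : l.length using Nat.strong_induction_on generalizing l with
  | _ n ih =>
  subst hn
  rw [onesMod3]
  by_cases h0 : l.length = 0
  · obtain rfl := List.length_eq_zero_iff.mp h0
    simp [PySem.Int.mod]
  by_cases h1 : l.length = 1
  · obtain ⟨c, rfl⟩ := List.length_eq_one_iff.mp h1
    rw [if_neg h0, if_pos h1]
    by_cases hc1 : c = '1'
    · subst hc1; simp [PySem.Int.mod]
    by_cases hc0 : c = '0'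
    · subst hc0; simp [PySem.Int.mod]
    · rw [if_neg (by simp [hc1]), if_neg (by simp [hc0]),
          if_neg (by simp [hc0, hc1])]
  · rw [if_neg h0, if_neg h1]
    dsimp only
    rw [PySem.List.slice_to_natCast, PySem.List.slice_from_natCast]
    have hlen : 2 ≤ l.length := by omega
    have ht : (l.take (l.length / 2)).length < l.length := by
      simp [List.length_take]; omega
    have hd : (l.drop (l.length / 2)).length < l.length := by
      simp [List.length_drop]; omega
    have hsplit : l.take (l.length / 2) ++ l.drop (l.length / 2) = l := List.take_append_drop _ _
    rw [ih _ ht _ rfl, ih _ hd _ rfl]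
    have hall_eq : l.all (fun c => c == '0' || c == '1')
        = ((l.take (l.length / 2)).all (fun c => c == '0' || c == '1')
           && (l.drop (l.length / 2)).all (fun c => c == '0' || c == '1')) := by
      conv_lhs => rw [← hsplit]
      rw [List.all_append]
    have hc : (l.count '1' : Int)
        = ((l.take (l.length / 2)).count '1' : Int) + ((l.drop (l.length / 2)).count '1' : Int) := by
      conv_lhs => rw [← hsplit]
      rw [List.count_append]
      push_cast; ring
    by_cases ha : (l.take (l.length / 2)).all (fun c => c == '0' || c == '1') = true
    · by_cases hb : (l.drop (l.length / 2)).all (fun c => c == '0' || c == '1') = true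
      · rw [if_pos ha, if_pos hb, hall_eq, ha, hb]
        simp [PySem.Int.mod, Int.fmod_eq_emod]
        omega
      · rw [if_pos ha, if_neg hb, hall_eq]
        simp [hb]
    · rw [if_neg ha, hall_eq]
      simp [ha]

-- ===== VERDICT =====
theorem dfa_divisible_by_3_spec : Claim_equal_dfa_divisible_by_3 := by
  intro s _
  unfold Spec_dfa_divisible_by_3 dfa_divisible_by_3 dfa_divisible_by_3_alt
  rw [dfaAGo_eq _ _ (by norm_num) (by norm_num), onesMod3_eq]
  by_cases hall : s.toList.all (fun c => c == '0' || c == '1')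
  · simp [hall]
  · simp [hall]
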